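-- pv_equiv track=rewrite | github.com/dagoaty/AdventofCode2021 | day10/day10.py | calculateCloseScore
-- ===== SOURCE A (Python) =====
-- from typing import List, Dict
--
-- def calculateCloseScore(scores: List[str]) -> int:
--     score: int = 0
--     for c in scores:
--         score *= 5
--         if c == ')':
--             score += 1
--         elif c == ']':
--             score += 2
--         elif c == '}':
--             score += 3
--         elif c == '>':
--             score += 4
--     return score
-- ===== SOURCE B (Python) =====
-- def calculateCloseScore(scores):
--     valmap = {')': 1, ']': 2, '}': 3, '>': 4}
--     total = 0
--     place = 1
--     for c in reversed(scores):
--         total += valmap.get(c, 0) * place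
--         place *= 5
--     return total
-- ===== Notes on version B (the rewrite author's own statement) =====
-- stated objective: alternative
-- what changed: Replaces Horner-style forward accumulation (score = score*5 + digit each step) with a back-to-front traversal using a digit map and an explicit place value: iterate reversed(scores) adding valmap.get(c,0)*place while place *= 5, with no multiply-accumulate on the running score.
import Mathlib
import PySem

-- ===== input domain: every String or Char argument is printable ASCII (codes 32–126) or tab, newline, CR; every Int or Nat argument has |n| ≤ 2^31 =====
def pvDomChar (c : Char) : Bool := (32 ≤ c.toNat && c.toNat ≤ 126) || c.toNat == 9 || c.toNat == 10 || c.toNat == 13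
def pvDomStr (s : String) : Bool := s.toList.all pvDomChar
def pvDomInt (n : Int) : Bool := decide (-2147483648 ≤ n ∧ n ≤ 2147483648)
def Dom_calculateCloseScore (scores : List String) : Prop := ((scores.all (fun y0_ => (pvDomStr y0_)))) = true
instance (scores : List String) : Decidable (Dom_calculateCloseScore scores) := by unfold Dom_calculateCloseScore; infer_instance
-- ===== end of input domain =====

-- B replaces Horner forward accumulation with a back-to-front traversal keeping an explicit place value (objective: alternative).

-- ===== PORT A =====
def calculateCloseScore (scores : List String) : Int :=
  scores.foldl (fun score c =>
    let score := score * 5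
    if c = ")" then score + 1
    else if c = "]" then score + 2
    else if c = "}" then score + 3
    else if c = ">" then score + 4
    else score) 0

-- ===== PORT B =====
def calculateCloseScore_alt (scores : List String) : Int :=
  let valmap : PySem.Dict String Int := PySem.Dict.ofList [(")", 1), ("]", 2), ("}", 3), (">", 4)]
  (scores.reverse.foldl (fun s c => (s.1 + valmap.getD c 0 * s.2, s.2 * 5)) ((0 : Int), (1 : Int))).1

-- ===== PRECONDITION & SPEC =====
def Spec_calculateCloseScore (scores : List String) (out : Int) : Prop := out = calculateCloseScore_alt scores
instance (scores : List String) (out : Int) : Decidable (Spec_calculateCloseScore scores out) := by unfold Spec_calculateCloseScore; infer_instance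

-- ===== CLAIM (what is proved, stated in full; the proofs are below) =====
def Claim_equal_calculateCloseScore : Prop := ∀ (scores : List String), Dom_calculateCloseScore scores → Spec_calculateCloseScore scores (calculateCloseScore scores)

-- ===== LEMMAS AND PROOFS =====

-- the per-character digit value both programs assign
def pvDigit (c : String) : Int :=
  if c = ")" then 1 else if c = "]" then 2 else if c = "}" then 3 else if c = ">" then 4 else 0

-- recursive positional value: V (c :: cs) = digit c * 5^len cs + V cs
def pvVal : List String → Int
  | [] => 0
  | c :: cs => pvDigit c * (5 : Int) ^ cs.length + pvVal cs

lemma pvA_fun_eq :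
    (fun (score : Int) (c : String) =>
      let score := score * 5
      if c = ")" then score + 1
      else if c = "]" then score + 2
      else if c = "}" then score + 3
      else if c = ">" then score + 4
      else score) = fun score c => score * 5 + pvDigit c := by
  funext a c
  simp only [pvDigit]
  split_ifs <;> ring

lemma pvA_horner (xs : List String) (a : Int) :
    xs.foldl (fun score c => score * 5 + pvDigit c) a = a * (5 : Int) ^ xs.length + pvVal xs := by
  induction xs generalizing a with
  | nil => simp [pvVal]
  | cons c cs ih =>
    simp only [List.foldl_cons, ih, pvVal, List.length_cons, pow_succ]
    ring

lemma pvDigit_eq_getD (c : String) :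
    (PySem.Dict.ofList ([(")", 1), ("]", 2), ("}", 3), (">", 4)] : List (String × Int))).getD c 0 = pvDigit c := by
  have hd : (PySem.Dict.ofList ([(")", 1), ("]", 2), ("}", 3), (">", 4)] : List (String × Int)))
      = PySem.Dict.mk [(")", 1), ("]", 2), ("}", 3), (">", 4)] := by decide
  rw [hd]
  simp only [PySem.Dict.getD, PySem.Dict.get?_mk_cons, pvDigit]
  by_cases h1 : c = ")"
  · subst h1; decide
  by_cases h2 : c = "]"
  · subst h2; decide
  by_cases h3 : c = "}"
  · subst h3; decide
  by_cases h4 : c = ">"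
  · subst h4; decide
  simp [PySem.Dict.get?, beq_iff_eq, h1, h2, h3, h4, Ne.symm h1, Ne.symm h2, Ne.symm h3, Ne.symm h4]

lemma pvB_loop (xs : List String) (t p : Int) :
    xs.reverse.foldl (fun s c => (s.1 + pvDigit c * s.2, s.2 * 5)) (t, p)
      = (t + pvVal xs * p, p * (5 : Int) ^ xs.length) := by
  induction xs generalizing t p with
  | nil => simp [pvVal]
  | cons c cs ih =>
    simp only [List.reverse_cons, List.foldl_append, List.foldl_cons, List.foldl_nil, ih,
      pvVal, List.length_cons, pow_succ]
    exact Prod.ext (by ring) (by ring)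

-- ===== VERDICT (by name: the statement is the Claim_ definition above) =====
theorem calculateCloseScore_spec : Claim_equal_calculateCloseScore := by
  intro scores _
  unfold Spec_calculateCloseScore calculateCloseScore calculateCloseScore_alt
  rw [pvA_fun_eq, pvA_horner]
  simp only [pvDigit_eq_getD]
  rw [pvB_loop scores 0 1]
  ring
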